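-- pv_equiv track=rewrite | github.com/romeorizzi/temi_prog_public | 2018.12.05.provetta/all-CMS-submissions-2018-12-05/2018-12-05.12:55:09.729263.VR437168.rank_unrank_ABstrings.py | ABstring2rank
-- ===== SOURCE A (Python) =====
-- def ABstring2rank(s):
--     i = (len(s)-1)
--     somma = 0
--     while i >= 0:
--         if s[i] == 'A':
--             somma = somma + 0
--         else:
--             somma = somma + 2**(len(s)-i-1)
--         i = i - 1
--     return somma
-- ===== SOURCE B (Python) =====
-- def ABstring2rank(s):
--     somma = 0
--     for c in s:
--         somma = somma * 2 + (0 if c == 'A' else 1)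
--     return somma
-- ===== Notes on version B (the rewrite author's own statement) =====
-- stated objective: faster
-- what changed: Replaces the backwards index loop with explicit 2**(len(s)-i-1) powers by a left-to-right Horner accumulator somma = somma*2 + bit.
import Mathlib
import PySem

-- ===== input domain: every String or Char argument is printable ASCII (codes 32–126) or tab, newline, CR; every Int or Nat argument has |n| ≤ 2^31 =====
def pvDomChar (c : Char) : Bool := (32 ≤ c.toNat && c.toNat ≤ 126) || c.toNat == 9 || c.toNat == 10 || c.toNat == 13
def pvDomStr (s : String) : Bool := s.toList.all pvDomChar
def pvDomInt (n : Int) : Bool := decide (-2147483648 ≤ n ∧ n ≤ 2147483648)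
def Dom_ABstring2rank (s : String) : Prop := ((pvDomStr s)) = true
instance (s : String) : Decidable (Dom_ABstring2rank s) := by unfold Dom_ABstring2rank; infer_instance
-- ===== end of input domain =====

-- ===== PORT A =====
-- B changes the decomposition: A scans right-to-left adding explicit powers of two,
-- B scans left-to-right with a Horner multiply-add accumulator. Proved equal on all strings.

-- while i >= 0: … ; i = i - 1   (k = i + 1 counts the remaining iterations)
def pvLoopA (cs : List Char) (n : Nat) : Nat → Int → Int
  | 0, somma => somma
  | k + 1, somma =>
      let somma' : Int :=
        if PySem.List.pyGet? cs (k : Int) = some 'A' then somma + 0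
        else somma + 2 ^ (n - k - 1)
      pvLoopA cs n k somma'

def ABstring2rank (s : String) : Int :=
  pvLoopA s.toList s.toList.length s.toList.length 0

-- ===== PORT B =====
def ABstring2rank_alt (s : String) : Int :=
  s.toList.foldl (fun somma c => somma * 2 + (if c = 'A' then 0 else 1)) 0

-- ===== PRECONDITION & SPEC =====
def Spec_ABstring2rank (s : String) (out : Int) : Prop := out = ABstring2rank_alt s
instance (s : String) (out : Int) : Decidable (Spec_ABstring2rank s out) := by unfold Spec_ABstring2rank; infer_instance

-- ===== CLAIM (what is proved, stated in full; the proofs are below) =====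
def Claim_equal_ABstring2rank : Prop := ∀ (s : String), Dom_ABstring2rank s → Spec_ABstring2rank s (ABstring2rank s)

-- ===== LEMMAS AND PROOFS =====

theorem pvLoopA_add (cs : List Char) (n : Nat) :
    ∀ (k : Nat) (s : Int), pvLoopA cs n k s = s + pvLoopA cs n k 0 := by
  intro k
  induction k with
  | zero => intro s; simp [pvLoopA]
  | succ k ih =>
      intro s
      simp only [pvLoopA]
      split
      · rw [ih, ih (0 + 0)]; ring
      · rw [ih, ih (0 + 2 ^ (n - k - 1))]; ring

theorem pvLoopA_append (cs : List Char) (c : Char) :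
    ∀ (k : Nat), k ≤ cs.length →
      pvLoopA (cs ++ [c]) (cs.length + 1) k 0 = 2 * pvLoopA cs cs.length k 0 := by
  intro k
  induction k with
  | zero => intro _; simp [pvLoopA]
  | succ k ih =>
      intro hk
      have hk' : k < cs.length := hk
      have hget : PySem.List.pyGet? (cs ++ [c]) (k : Int) = PySem.List.pyGet? cs (k : Int) := by
        rw [PySem.List.pyGet?_natCast, PySem.List.pyGet?_natCast,
            List.getElem?_append_left hk']
      have he : cs.length + 1 - k - 1 = (cs.length - k - 1) + 1 := by omega
      simp only [pvLoopA, hget]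
      split
      · rw [pvLoopA_add, pvLoopA_add cs, ih (Nat.le_of_lt hk')]
        ring
      · rw [pvLoopA_add, pvLoopA_add cs, ih (Nat.le_of_lt hk'), he, pow_succ]
        ring

theorem pvLoopA_eq_foldl (cs : List Char) :
    pvLoopA cs cs.length cs.length 0 =
      cs.foldl (fun somma c => somma * 2 + (if c = 'A' then 0 else 1)) 0 := by
  induction cs using List.reverseRecOn with
  | nil => simp [pvLoopA]
  | append_singleton cs c ih =>
      have hlen : (cs ++ [c]).length = cs.length + 1 := by simp
      rw [hlen]
      show pvLoopA (cs ++ [c]) (cs.length + 1) (cs.length + 1) 0 = _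
      simp only [pvLoopA, PySem.List.pyGet?_natCast]
      rw [List.getElem?_append_right (Nat.le_refl _)]
      simp only [Nat.sub_self, List.getElem?_cons_zero, Nat.add_sub_cancel_left]
      rw [pvLoopA_add]
      rw [pvLoopA_append cs c cs.length (Nat.le_refl _), ih]
      rw [List.foldl_append]
      simp only [List.foldl]
      split
      · next h =>
          have hc : c = 'A' := Option.some_injective _ h
          simp [hc, Int.mul_comm]
      · next h =>
          have hc : c ≠ 'A' := fun e => h (by rw [e])
          simp only [if_neg hc]
          ring

-- ===== VERDICT (by name: the statement is the Claim_ definition above) =====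
theorem ABstring2rank_spec : Claim_equal_ABstring2rank := by
  intro s _
  unfold Spec_ABstring2rank ABstring2rank ABstring2rank_alt
  exact pvLoopA_eq_foldl s.toList
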